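-- pv_equiv track=rewrite | github.com/Fas96/AlgoSolution | 2358-maximum-number-of-groups-entering-a-competition/2358-maximum-number-of-groups-entering-a-competition.py | maximumGroups
-- ===== SOURCE A (Python) =====
-- from typing import List
--
-- def maximumGroups(grades: List[int]) -> int:
--     def canform(grades,rd):
--         return rd*(rd+1)/2 <= len(grades)
--
--     l ,r=0,10**5
--
--     while l<=r:
--         m=(l+r)//2
--         if canform(grades,m):
--             l=m+1
--         else:
--             r=m-1
--     return r
-- ===== SOURCE B (Python) =====
-- from typing import List
--
-- def maximumGroups(grades: List[int]) -> int:
--     # Linear greedy scan of the same search range [0, 10**5] that A binary-searches: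
--     # keep adding groups of size 1,2,3,... while the next one still fits.
--     n = len(grades)
--     total = 0
--     k = 0
--     while k < 10 ** 5 and total + k + 1 <= n:
--         k += 1
--         total += k
--     return k
-- ===== Notes on version B (the rewrite author's own statement) =====
-- stated objective: simpler
-- what changed: Replaced A's binary search over the range [0,10^5] on the inequality k(k+1)/2 <= n by a linear greedy loop over the same range that accumulates consecutive group sizes until the next group no longer fits.
import Mathlib
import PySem

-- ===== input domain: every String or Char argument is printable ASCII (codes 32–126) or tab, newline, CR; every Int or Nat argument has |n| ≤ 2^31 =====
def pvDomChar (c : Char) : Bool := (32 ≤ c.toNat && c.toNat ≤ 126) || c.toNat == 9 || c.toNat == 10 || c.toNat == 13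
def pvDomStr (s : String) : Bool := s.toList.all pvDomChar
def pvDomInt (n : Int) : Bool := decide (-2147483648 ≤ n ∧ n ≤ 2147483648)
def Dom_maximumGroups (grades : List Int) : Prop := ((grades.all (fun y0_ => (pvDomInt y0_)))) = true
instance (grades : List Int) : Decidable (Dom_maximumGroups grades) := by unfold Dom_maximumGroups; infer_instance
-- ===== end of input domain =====

-- B scans A's search range [0,10^5] linearly with a running sum instead of binary-searching it (simpler).

-- ===== PORT A =====
-- canform(grades, rd): rd*(rd+1)/2 <= len(grades).  Python's '/' is float division, but
-- rd*(rd+1) is even and, for the rd ≤ 10^5 reached here, rd*(rd+1) < 2^53 so the float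
-- arithmetic and the int/float comparison are exact; ported as the exact integer floordiv.
def canformA (n rd : Int) : Bool := PySem.Int.floordiv (rd * (rd + 1)) 2 ≤ n

-- the 'while l <= r' binary-search loop of A, state (l, r)
def loopA (n l r : Int) : Int :=
  if _h : l ≤ r then
    let m := PySem.Int.floordiv (l + r) 2
    if canformA n m then loopA n (m + 1) r else loopA n l (m - 1)
  else r
termination_by (r + 1 - l).toNat
decreasing_by
  · exact (Int.toNat_lt_toNat (Int.sub_pos.mpr (Int.lt_add_one_iff.mpr _h))).mpr
      (sub_lt_sub_left (Int.lt_add_one_iff.mpr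
        (PySem.Int.floordiv_two_mid_bounds (lo := l) (hi := r) _h).1) (r + 1))
  · exact (Int.toNat_lt_toNat (Int.sub_pos.mpr (Int.lt_add_one_iff.mpr _h))).mpr
      (sub_lt_sub_right ((sub_add_cancel (PySem.Int.floordiv (l + r) 2) 1).symm ▸
        (Int.lt_add_one_iff.mpr
          (PySem.Int.floordiv_two_mid_bounds (lo := l) (hi := r) _h).2)) l)

def maximumGroups (grades : List Int) : Int :=
  loopA (grades.length : Int) 0 (10 ^ 5)

-- ===== PORT B =====
-- the 'while k < 10**5 and total + k + 1 <= n' loop of B, state (total, k)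
def loopB (n total : Int) (k : Nat) : Int :=
  if _h : (k : Int) < 10 ^ 5 ∧ total + (k : Int) + 1 ≤ n then
    loopB n (total + (k : Int) + 1) (k + 1)
  else (k : Int)
termination_by (n - total).toNat
decreasing_by
  exact (Int.toNat_lt_toNat (by omega)).mpr (by omega)

def maximumGroups_alt (grades : List Int) : Int :=
  loopB (grades.length : Int) 0 0

-- ===== PRECONDITION & SPEC =====
def Spec_maximumGroups (grades : List Int) (out : Int) : Prop := out = maximumGroups_alt grades
instance (grades : List Int) (out : Int) : Decidable (Spec_maximumGroups grades out) := by unfold Spec_maximumGroups; infer_instance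

-- ===== CLAIM (what is proved, stated in full; the proofs are below) =====
def Claim_equal_maximumGroups : Prop := ∀ (grades : List Int), Dom_maximumGroups grades → Spec_maximumGroups grades (maximumGroups grades)

-- ===== LEMMAS AND PROOFS =====

-- Characterisation of both results: out is THE x in [0, 10^5] with x(x+1) ≤ 2n and
-- (x = 10^5 or 2n < (x+1)(x+2)).
def PvBracket (n x : Int) : Prop :=
  0 ≤ x ∧ x ≤ 10 ^ 5 ∧ x * (x + 1) ≤ 2 * n ∧ (x = 10 ^ 5 ∨ 2 * n < (x + 1) * (x + 2))

theorem bracket_unique {n x y : Int} (hx : PvBracket n x) (hy : PvBracket n y) : x = y := by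
  obtain ⟨hx0, hx5, hx1, hx2⟩ := hx
  obtain ⟨hy0, hy5, hy1, hy2⟩ := hy
  by_contra hne
  rcases lt_or_gt_of_ne hne with h | h
  · rcases hx2 with h5 | h2
    · omega
    · nlinarith
  · rcases hy2 with h5 | h2
    · omega
    · nlinarith

-- A's loop invariant: canform holds just below l, fails just above r (or r is still the
-- initial bound 10^5), 0 ≤ l ≤ r + 1 and 0 ≤ r ≤ 10^5.
theorem loopA_bracket (n l r : Int) (_hn : 0 ≤ n)
    (hl0 : 0 ≤ l) (hr0 : 0 ≤ r) (hr5 : r ≤ 10 ^ 5)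
    (hl : (l - 1) * l ≤ 2 * n) (hr : r = 10 ^ 5 ∨ 2 * n < (r + 1) * (r + 2))
    (hlr : l ≤ r + 1) :
    PvBracket n (loopA n l r) := by
  fun_induction loopA n l r with
  | case1 l r h m hcond ih =>
      have hm := PySem.Int.floordiv_two_mid_bounds (lo := l) (hi := r) h
      simp only [canformA, decide_eq_true_eq] at hcond
      rw [PySem.Int.floordiv_eq_ediv_of_pos (by norm_num)] at hcond
      obtain ⟨t, ht⟩ := Int.even_mul_succ_self m
      have hm2 : m * (m + 1) ≤ 2 * n := by omega
      exact ih (by omega) hr0 hr5 (by nlinarith) hr (by omega)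
  | case2 l r h m hcond ih =>
      have hm := PySem.Int.floordiv_two_mid_bounds (lo := l) (hi := r) h
      simp only [canformA, decide_eq_true_eq] at hcond
      rw [PySem.Int.floordiv_eq_ediv_of_pos (by norm_num)] at hcond
      obtain ⟨t, ht⟩ := Int.even_mul_succ_self m
      have hm2 : 2 * n < m * (m + 1) := by omega
      have hm1 : 1 ≤ m := by nlinarith
      exact ih hl0 (by omega) (by omega) hl (Or.inr (by nlinarith)) (by omega)
  | case3 l r h =>
      have : l = r + 1 := by omega
      subst this
      exact ⟨hr0, hr5, by nlinarith, hr⟩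

-- B's loop invariant: total is the sum 1 + 2 + ⋯ + k of the groups placed so far.
theorem loopB_bracket (n : Int) (total : Int) (k : Nat)
    (htot : 2 * total = (k : Int) * ((k : Int) + 1)) (hle : total ≤ n)
    (hk : (k : Int) ≤ 10 ^ 5) :
    PvBracket n (loopB n total k) := by
  fun_induction loopB n total k with
  | case1 total k h ih =>
      exact ih (by push_cast; ring_nf; ring_nf at htot; omega) h.2 (by push_cast; omega)
  | case2 total k h =>
      push Not at h
      refine ⟨Int.natCast_nonneg k, hk, by omega, ?_⟩
      by_cases h5 : (k : Int) = 10 ^ 5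
      · exact Or.inl h5
      · exact Or.inr (by nlinarith [h (by omega)])

theorem maximumGroups_spec_aux (grades : List Int) :
    maximumGroups grades = maximumGroups_alt grades := by
  have hn : (0 : Int) ≤ (grades.length : Int) := by positivity
  have hA : PvBracket (grades.length : Int) (maximumGroups grades) :=
    loopA_bracket _ 0 (10 ^ 5) hn (by norm_num) (by norm_num) (by norm_num)
      (by norm_num) (Or.inl rfl) (by norm_num)
  have hB : PvBracket (grades.length : Int) (maximumGroups_alt grades) :=
    loopB_bracket _ 0 0 (by norm_num) hn (by norm_num)
  exact bracket_unique hA hB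

-- ===== VERDICT (by name: the statement is the Claim_ definition above) =====
theorem maximumGroups_spec : Claim_equal_maximumGroups := by
  intro grades _
  exact maximumGroups_spec_aux grades
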